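-- pv_equiv track=rewrite | github.com/JernejHabjan/School | FRI/Programing/Python/1Letnik/Laboratorijske vaje/vaje09/vaja.py | postnina
-- ===== SOURCE A (Python) =====
-- def postnina(n):
--     deljitelji = []
--     vsota = []
--     for i in range(1, n + 1):
--         if n % i == 0:
--             deljitelji.append(i)
--     for x in deljitelji:
--         for y in deljitelji:
--             for z in deljitelji:
--                 if z * x * y == n:
--                     vsota.append((x, y, z))
--     return min([sum(x) for x in vsota])
-- ===== SOURCE B (Python) =====
-- def postnina(n):
--     # enumerate divisors in O(sqrt n) pairs, then scan divisor pairs (x, y):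
--     # if y divides n//x the triple (x, y, n//(x*y)) multiplies to n.
--     divs = []
--     i = 1
--     while i * i <= n:
--         if n % i == 0:
--             divs.append(i)
--             if i != n // i:
--                 divs.append(n // i)
--         i += 1
--     best = None
--     for x in divs:
--         m = n // x
--         for y in divs:
--             if m % y == 0:
--                 s = x + y + m // y
--                 if best is None or s < best:
--                     best = s
--     return best
-- ===== Notes on version B (the rewrite author's own statement) =====
-- stated objective: faster
-- what changed: B enumerates divisors in sqrt(n) steps by pairing i with n//i and replaces A's triple loop over all divisors with a double loop that computes the third factor by division (z = (n//x)//y), keeping a running minimum instead of building the list of triples.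
import Mathlib
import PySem

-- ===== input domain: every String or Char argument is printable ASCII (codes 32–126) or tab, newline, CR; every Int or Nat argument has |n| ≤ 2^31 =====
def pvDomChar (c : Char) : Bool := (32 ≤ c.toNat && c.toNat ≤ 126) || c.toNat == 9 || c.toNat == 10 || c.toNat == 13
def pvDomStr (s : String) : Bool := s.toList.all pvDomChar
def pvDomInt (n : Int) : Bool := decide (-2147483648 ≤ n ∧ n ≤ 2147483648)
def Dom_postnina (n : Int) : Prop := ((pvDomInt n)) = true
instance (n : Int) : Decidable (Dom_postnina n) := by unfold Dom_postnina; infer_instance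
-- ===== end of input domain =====

-- B replaces A's O(n) divisor scan and triple loop by a sqrt(n) divisor enumeration and a
-- double loop with the third factor computed by division; equivalence is proved on n ≥ 1
-- (on n ≤ 0 A raises ValueError on min of an empty list).

-- ===== PORT A =====
def postnina (n : Int) : Int :=
  let deljitelji := (PySem.List.pyRange 1 (n + 1) 1).foldl
      (fun acc i => if PySem.Int.mod n i = 0 then acc ++ [i] else acc) []
  let vsota := deljitelji.foldl (fun acc x =>
      deljitelji.foldl (fun acc y =>
        deljitelji.foldl (fun acc z =>
          if z * x * y = n then acc ++ [(x, y, z)] else acc) acc) acc) []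
  -- Python 'min(list)' raises on an empty list: that case is excluded by Pre_postnina
  (PySem.List.min? (vsota.map (fun t => t.1 + t.2.1 + t.2.2)) (fun v => v)).getD 0

-- ===== PORT B =====
-- the 'while i * i <= n' loop of Source B
def pvDivLoop (n : Int) (i : Int) (acc : List Int) : List Int :=
  if _h : i * i ≤ n then
    let acc :=
      if PySem.Int.mod n i = 0 then
        let acc := acc ++ [i]
        if i ≠ PySem.Int.floordiv n i then acc ++ [PySem.Int.floordiv n i] else acc
      else acc
    pvDivLoop n (i + 1) acc
  else acc
termination_by (n + 1 - i).toNat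
decreasing_by
  have : i ≤ n := by nlinarith [sq_nonneg i]
  omega

def postnina_alt (n : Int) : Int :=
  let divs := pvDivLoop n 1 []
  let best := divs.foldl (fun best x =>
    let m := PySem.Int.floordiv n x
    divs.foldl (fun best y =>
      if PySem.Int.mod m y = 0 then
        let s := x + y + PySem.Int.floordiv m y
        match best with
        | none => some s
        | some b => some (if s < b then s else b)
      else best) best) none
  -- Source B returns None when the loops find no candidate; excluded by Pre_postnina
  best.getD 0

-- ===== PRECONDITION & SPEC =====
-- Pre_ excludes exactly n ≤ 0, where A raises ValueError (min of an empty list).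
def Pre_postnina (n : Int) : Prop := 1 ≤ n
instance (n : Int) : Decidable (Pre_postnina n) := by unfold Pre_postnina; infer_instance
def pvWitness_postnina : Int := 12

def Spec_postnina (n : Int) (out : Int) : Prop := out = postnina_alt n
instance (n : Int) (out : Int) : Decidable (Spec_postnina n out) := by unfold Spec_postnina; infer_instance

-- ===== CLAIM (what is proved, stated in full; the proofs are below) =====
def Claim_equal_postnina : Prop := ∀ (n : Int), Dom_postnina n → Pre_postnina n → Spec_postnina n (postnina n)

-- ===== LEMMAS AND PROOFS =====

-- names A's intermediate lists (definitionally the lets inside `postnina`)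
def divsA (n : Int) : List Int :=
  (PySem.List.pyRange 1 (n + 1) 1).foldl
      (fun acc i => if PySem.Int.mod n i = 0 then acc ++ [i] else acc) []

def sumsA (n : Int) : List Int :=
  ((divsA n).foldl (fun acc x =>
      (divsA n).foldl (fun acc y =>
        (divsA n).foldl (fun acc z =>
          if z * x * y = n then acc ++ [(x, y, z)] else acc) acc) acc) []).map
    (fun t : Int × Int × Int => t.1 + t.2.1 + t.2.2)

-- the running-minimum step of B's loop
def omin (b : Option Int) (s : Int) : Option Int :=
  match b with
  | none => some s
  | some b => some (if s < b then s else b)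

-- B's candidate sums as a list
def sumsB (n : Int) : List Int :=
  (pvDivLoop n 1 []).flatMap (fun x =>
    ((pvDivLoop n 1 []).filter
        (fun y => decide (PySem.Int.mod (PySem.Int.floordiv n x) y = 0))).map
      (fun y => x + y + PySem.Int.floordiv (PySem.Int.floordiv n x) y))

-- the common mathematical characterisation of a candidate sum
def pvPSum (n v : Int) : Prop :=
  ∃ x y z : Int, 1 ≤ x ∧ 1 ≤ y ∧ 1 ≤ z ∧ z * x * y = n ∧ v = x + y + z

lemma postnina_eq (n : Int) :
    postnina n = (PySem.List.min? (sumsA n) (fun v => v)).getD 0 := rfl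

lemma one_le_of_mul (a b c : Int) (ha : 1 ≤ a) (hc : 1 ≤ c) (h : a * b = c) :
    1 ≤ b := by
  by_contra hb
  have h0 : a * b ≤ 0 := mul_nonpos_of_nonneg_of_nonpos (by omega) (by omega)
  rw [h] at h0
  omega

lemma pv_div_key (a b c : Int) (ha : a ≠ 0) (h : a * b = c) : c / a = b := by
  rw [← h, Int.mul_ediv_cancel_left _ ha]

lemma mem_divsA (n : Int) (hn : 1 ≤ n) (d : Int) :
    d ∈ divsA n ↔ 1 ≤ d ∧ d ∣ n := by
  unfold divsA
  rw [PySem.List.foldl_append_ite_eq_filter]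
  simp only [List.nil_append, List.mem_filter, PySem.List.mem_pyRange_one,
    decide_eq_true_eq, PySem.Int.mod_eq_zero_iff_dvd]
  constructor
  · rintro ⟨⟨h1, _⟩, h3⟩; exact ⟨h1, h3⟩
  · rintro ⟨h1, h2⟩
    exact ⟨⟨h1, by have := Int.le_of_dvd (by omega) h2; omega⟩, h2⟩

lemma mem_sumsA (n : Int) (hn : 1 ≤ n) (v : Int) : v ∈ sumsA n ↔ pvPSum n v := by
  unfold sumsA
  simp only [PySem.List.foldl_append_ite, PySem.List.foldl_append_eq_flatMap,
    List.nil_append, List.mem_map, List.mem_flatMap, List.mem_filter,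
    decide_eq_true_eq, mem_divsA n hn]
  unfold pvPSum
  constructor
  · rintro ⟨a, ⟨x, ⟨hx1, _⟩, y, ⟨hy1, _⟩, z, ⟨⟨hz1, _⟩, hmul⟩, rfl⟩, hv⟩
    exact ⟨x, y, z, hx1, hy1, hz1, hmul, hv.symm⟩
  · rintro ⟨x, y, z, hx1, hy1, hz1, hmul, hv⟩
    exact ⟨(x, y, z),
      ⟨x, ⟨hx1, ⟨z * y, by rw [← hmul]; ring⟩⟩,
        y, ⟨hy1, ⟨z * x, by rw [← hmul]; ring⟩⟩,
        z, ⟨⟨hz1, ⟨x * y, by rw [← hmul]; ring⟩⟩, hmul⟩, rfl⟩, hv.symm⟩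

lemma mem_pvDivLoop (n i : Int) (hi : 1 ≤ i) (acc : List Int) (d : Int) :
    d ∈ pvDivLoop n i acc ↔
      d ∈ acc ∨ ∃ j, i ≤ j ∧ j * j ≤ n ∧ j ∣ n ∧ (d = j ∨ d = n / j) := by
  have hsplit : (∃ j, i ≤ j ∧ j * j ≤ n ∧ j ∣ n ∧ (d = j ∨ d = n / j)) ↔
      (i * i ≤ n ∧ i ∣ n ∧ (d = i ∨ d = n / i)) ∨
        (∃ j, i + 1 ≤ j ∧ j * j ≤ n ∧ j ∣ n ∧ (d = j ∨ d = n / j)) := by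
    constructor
    · rintro ⟨j, hj, hP⟩
      rcases eq_or_lt_of_le hj with h | h
      · exact Or.inl (h ▸ hP)
      · exact Or.inr ⟨j, by omega, hP⟩
    · rintro (hP | ⟨j, hj, hP⟩)
      · exact ⟨i, le_refl i, hP⟩
      · exact ⟨j, by omega, hP⟩
  rw [hsplit]
  by_cases hle : i * i ≤ n
  · have hfd : PySem.Int.floordiv n i = n / i :=
      PySem.Int.floordiv_eq_ediv_of_pos (by omega)
    have hrec := mem_pvDivLoop n (i + 1) (by omega)
    by_cases hmod : PySem.Int.mod n i = 0
    · have hdvd : i ∣ n := (PySem.Int.mod_eq_zero_iff_dvd n i).mp hmod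
      by_cases hne : i ≠ PySem.Int.floordiv n i
      · have hne' : i ≠ n / i := by rw [hfd] at hne; exact hne
        rw [pvDivLoop]
        simp only [dif_pos hle, if_pos hmod, hfd, if_pos hne', hrec,
          List.mem_append, List.mem_singleton]
        constructor
        · rintro (((h | h) | h) | h)
          · exact Or.inl h
          · exact Or.inr (Or.inl ⟨hle, hdvd, Or.inl h⟩)
          · exact Or.inr (Or.inl ⟨hle, hdvd, Or.inr h⟩)
          · exact Or.inr (Or.inr h)
        · rintro (h | ⟨_, _, (h | h)⟩ | h)
          · exact Or.inl (Or.inl (Or.inl h))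
          · exact Or.inl (Or.inl (Or.inr h))
          · exact Or.inl (Or.inr h)
          · exact Or.inr h
      · have heq : i = PySem.Int.floordiv n i := not_not.mp hne
        have hni : n / i = i := by rw [← hfd, ← heq]
        rw [pvDivLoop]
        simp only [dif_pos hle, if_pos hmod, if_neg hne, hrec,
          List.mem_append, List.mem_singleton]
        constructor
        · rintro ((h | h) | h)
          · exact Or.inl h
          · exact Or.inr (Or.inl ⟨hle, hdvd, Or.inl h⟩)
          · exact Or.inr (Or.inr h)
        · rintro (h | ⟨_, _, (h | h)⟩ | h)
          · exact Or.inl (Or.inl h)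
          · exact Or.inl (Or.inr h)
          · rw [hni] at h
            exact Or.inl (Or.inr h)
          · exact Or.inr h
    · rw [pvDivLoop]
      simp only [dif_pos hle, if_neg hmod, hrec]
      constructor
      · rintro (h | h)
        · exact Or.inl h
        · exact Or.inr (Or.inr h)
      · rintro (h | ⟨_, hd2, _⟩ | h)
        · exact Or.inl h
        · exact absurd ((PySem.Int.mod_eq_zero_iff_dvd n i).mpr hd2) hmod
        · exact Or.inr h
  · rw [pvDivLoop]
    simp only [dif_neg hle]
    constructor
    · exact Or.inl
    · rintro (h | ⟨hjj, _⟩ | ⟨j, hj, hjj, _⟩)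
      · exact h
      · exact absurd hjj hle
      · have hgt : n < i * i := by omega
        have hii : ¬ j * j ≤ n := by intro hcon; nlinarith
        exact absurd hjj hii
termination_by (n + 1 - i).toNat
decreasing_by
  have h1 : i ≤ n := by nlinarith [sq_nonneg (i - 1)]
  omega

lemma mem_divsB (n : Int) (hn : 1 ≤ n) (d : Int) :
    d ∈ pvDivLoop n 1 [] ↔ 1 ≤ d ∧ d ∣ n := by
  rw [mem_pvDivLoop n 1 le_rfl]
  simp only [List.not_mem_nil, false_or]
  constructor
  · rintro ⟨j, h1j, hjj, hjd, hd | hd⟩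
    · exact hd ▸ ⟨h1j, hjd⟩
    · have hc : j * (n / j) = n := Int.mul_ediv_cancel' hjd
      have h1 : 1 ≤ n / j := one_le_of_mul j (n / j) n h1j hn hc
      subst hd
      exact ⟨h1, ⟨j, by rw [mul_comm]; exact hc.symm⟩⟩
  · rintro ⟨h1d, hdvd⟩
    have hc : d * (n / d) = n := Int.mul_ediv_cancel' hdvd
    have h1c : 1 ≤ n / d := one_le_of_mul d (n / d) n h1d hn hc
    by_cases hdd : d * d ≤ n
    · exact ⟨d, h1d, hdd, hdvd, Or.inl rfl⟩
    · have hqd : n / d < d := by nlinarith [hc]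
      have hqq : (n / d) * (n / d) ≤ n := by nlinarith [hc]
      refine ⟨n / d, h1c, hqq, ⟨d, by rw [mul_comm]; exact hc.symm⟩, Or.inr ?_⟩
      exact (pv_div_key (n / d) d n (by omega) (by rw [mul_comm]; exact hc)).symm

lemma mem_sumsB (n : Int) (hn : 1 ≤ n) (v : Int) : v ∈ sumsB n ↔ pvPSum n v := by
  unfold sumsB
  simp only [List.mem_flatMap, List.mem_map, List.mem_filter, decide_eq_true_eq,
    PySem.Int.mod_eq_zero_iff_dvd, mem_divsB n hn]
  unfold pvPSum
  constructor
  · rintro ⟨x, ⟨hx1, hxd⟩, y, ⟨⟨hy1, _⟩, hym⟩, hv⟩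
    have hfd : PySem.Int.floordiv n x = n / x :=
      PySem.Int.floordiv_eq_ediv_of_pos (by omega)
    rw [hfd] at hym hv
    have hm : x * (n / x) = n := Int.mul_ediv_cancel' hxd
    have hm1 : 1 ≤ n / x := one_le_of_mul x (n / x) n hx1 hn hm
    have hz : y * ((n / x) / y) = n / x := Int.mul_ediv_cancel' hym
    have hz1 : 1 ≤ (n / x) / y := one_le_of_mul y _ (n / x) hy1 hm1 hz
    have hfd2 : PySem.Int.floordiv (n / x) y = (n / x) / y :=
      PySem.Int.floordiv_eq_ediv_of_pos (by omega)
    rw [hfd2] at hv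
    refine ⟨x, y, (n / x) / y, hx1, hy1, hz1, ?_, hv.symm⟩
    calc ((n / x) / y) * x * y = x * (y * ((n / x) / y)) := by ring
      _ = x * (n / x) := by rw [hz]
      _ = n := hm
  · rintro ⟨x, y, z, hx1, hy1, hz1, hmul, hv⟩
    have hxd : x ∣ n := ⟨z * y, by rw [← hmul]; ring⟩
    have hfd : PySem.Int.floordiv n x = n / x :=
      PySem.Int.floordiv_eq_ediv_of_pos (by omega)
    have hnx : n / x = y * z := pv_div_key x (y * z) n (by omega) (by rw [← hmul]; ring)
    have hzy : (n / x) / y = z := by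
      rw [hnx]
      exact pv_div_key y z (y * z) (by omega) rfl
    refine ⟨x, ⟨hx1, hxd⟩, y, ⟨⟨hy1, ⟨z * x, by rw [← hmul]; ring⟩⟩, ?_⟩, ?_⟩
    · rw [hfd, hnx]
      exact ⟨z, rfl⟩
    · rw [hfd, PySem.Int.floordiv_eq_ediv_of_pos (by omega), hzy, hv]

lemma foldl_omin_filter (p : Int → Prop) [DecidablePred p] (f : Int → Int)
    (l : List Int) (b0 : Option Int) :
    l.foldl (fun b y => if p y then omin b (f y) else b) b0
      = ((l.filter (fun y => decide (p y))).map f).foldl omin b0 := by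
  induction l generalizing b0 with
  | nil => rfl
  | cons a t ih =>
      by_cases hp : p a
      · simp [hp, ih]
      · simp [hp, ih]

lemma foldl_omin_flatMap (g : Int → List Int) (l : List Int) (b0 : Option Int) :
    l.foldl (fun b x => (g x).foldl omin b) b0 = (l.flatMap g).foldl omin b0 := by
  induction l generalizing b0 with
  | nil => rfl
  | cons a t ih => simp [List.flatMap_cons, List.foldl_append, ih]

lemma postnina_alt_eq (n : Int) :
    postnina_alt n = ((sumsB n).foldl omin none).getD 0 := by
  unfold postnina_alt sumsB
  rw [← foldl_omin_flatMap]
  simp only [← foldl_omin_filter]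
  rfl

lemma foldl_omin_some (t : List Int) (a : Int) :
    t.foldl omin (some a) = some (t.foldl min a) := by
  induction t generalizing a with
  | nil => rfl
  | cons b t ih =>
      have h : omin (some a) b = some (min a b) := by
        rcases lt_or_ge b a with h | h <;> simp [omin, min_def, *]
      simp [List.foldl_cons, h, ih]

lemma min_agree (L M : List Int) (h : ∀ v, v ∈ L ↔ v ∈ M) :
    PySem.List.min? L (fun v => v) = M.foldl omin none := by
  cases L with
  | nil =>
      have hM : M = [] := by
        cases M with
        | nil => rfl
        | cons m t => exact absurd ((h m).mpr List.mem_cons_self) List.not_mem_nil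
      rw [hM]
      rfl
  | cons x s =>
      cases M with
      | nil => exact absurd ((h x).mp List.mem_cons_self) List.not_mem_nil
      | cons m t =>
          rw [PySem.List.min?_id_cons,
            show (m :: t).foldl omin none = some (t.foldl min m) from by
              rw [List.foldl_cons]; exact foldl_omin_some t m]
          have hL1 := PySem.List.foldl_min_le s x
          have hM1 := PySem.List.foldl_min_le t m
          have hLmem : s.foldl min x ∈ x :: s := by
            rcases PySem.List.foldl_min_mem s x with h1 | h1
            · rw [h1]; exact List.mem_cons_self
            · exact List.mem_cons_of_mem x h1
          have hMmem : t.foldl min m ∈ m :: t := by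
            rcases PySem.List.foldl_min_mem t m with h1 | h1
            · rw [h1]; exact List.mem_cons_self
            · exact List.mem_cons_of_mem m h1
          have hab : t.foldl min m ≤ s.foldl min x := by
            rcases List.mem_cons.mp ((h _).mp hLmem) with h1 | h1
            · rw [h1]; exact hM1.1
            · exact hM1.2 _ h1
          have hba : s.foldl min x ≤ t.foldl min m := by
            rcases List.mem_cons.mp ((h _).mpr hMmem) with h1 | h1
            · rw [h1]; exact hL1.1
            · exact hL1.2 _ h1
          exact congrArg some (le_antisymm hba hab)

-- ===== VERDICT (by name: the statement is the Claim_ definition above) =====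
theorem postnina_spec : Claim_equal_postnina := by
  intro n _ hn
  unfold Spec_postnina
  rw [postnina_eq, postnina_alt_eq,
    min_agree _ _ (fun v => (mem_sumsA n hn v).trans (mem_sumsB n hn v).symm)]
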